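-- pv_equiv track=rewrite | github.com/agheieff/Agent | core/security_manager.py | _determine_capabilities
-- ===== SOURCE A (Python) =====
-- from typing import Dict, List, Optional, Set
--
-- def _determine_capabilities(command: str, shell_type: str) -> Set[str]:
--     """Determine required capabilities for command"""
--     capabilities = set()
--
--     # Basic execution always required
--     capabilities.add('basic_execution')
--
--     # Shell-specific capability checks
--     if shell_type == 'nu':
--         if any(p in command for p in ['save', 'append', 'open']):
--             capabilities.add('file_operations')
--         if 'http' in command or 'fetch' in command:
--             capabilities.add('network_operations')
--     else:  # bash
--         if any(p in command for p in ['>', '>>', 'cat', 'cp', 'mv']):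
--             capabilities.add('file_operations')
--         if any(p in command for p in ['curl', 'wget', 'nc']):
--             capabilities.add('network_operations')
--
--     # Common capability checks
--     if 'sudo' in command or 'doas' in command:
--         capabilities.add('privileged_execution')
--     if any(p in command for p in ['systemctl', 'service']):
--         capabilities.add('service_management')
--
--     return capabilities
-- ===== SOURCE B (Python) =====
-- def _determine_capabilities(command: str, shell_type: str) -> set:
--     """Table-driven: (shell_key, patterns, capability); shell_key None = common,
--     'nu' only for nu, 'bash' for any non-nu shell."""
--     RULES = [
--         ('nu',   ['save', 'append', 'open'],    'file_operations'),
--         ('nu',   ['http', 'fetch'],             'network_operations'),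
--         ('bash', ['>', '>>', 'cat', 'cp', 'mv'], 'file_operations'),
--         ('bash', ['curl', 'wget', 'nc'],        'network_operations'),
--         (None,   ['sudo', 'doas'],              'privileged_execution'),
--         (None,   ['systemctl', 'service'],      'service_management'),
--     ]
--     caps = {'basic_execution'}
--     for shell_key, patterns, capability in RULES:
--         applies = (shell_key is None
--                    or (shell_key == 'nu') == (shell_type == 'nu'))
--         if applies and any(p in command for p in patterns):
--             caps.add(capability)
--     return caps
-- ===== Notes on version B (the rewrite author's own statement) =====
-- stated objective: idiomatic
-- what changed: Replaces the nested shell-specific if-chains with a single data-driven rules table (shell_key, patterns, capability) folded over in one uniform loop.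
import Mathlib
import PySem

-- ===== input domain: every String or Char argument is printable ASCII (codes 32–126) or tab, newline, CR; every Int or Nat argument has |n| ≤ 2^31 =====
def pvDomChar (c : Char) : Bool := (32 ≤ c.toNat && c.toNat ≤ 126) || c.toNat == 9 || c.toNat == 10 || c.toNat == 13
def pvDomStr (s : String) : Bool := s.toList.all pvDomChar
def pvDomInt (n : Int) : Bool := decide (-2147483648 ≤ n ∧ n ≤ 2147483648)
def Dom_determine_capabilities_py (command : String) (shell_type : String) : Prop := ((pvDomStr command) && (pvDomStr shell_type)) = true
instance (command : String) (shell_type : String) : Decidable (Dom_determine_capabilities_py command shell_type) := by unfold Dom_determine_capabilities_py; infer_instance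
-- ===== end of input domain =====

-- B replaces A's nested shell-specific if-chains with one data-driven rules table folded in a single uniform loop (objective: idiomatic).

-- ===== PORT A =====
def determine_capabilities_py (command : String) (shell_type : String) : List String :=
  let capabilities : PySem.Set String := PySem.Set.empty
  let capabilities := PySem.Set.add capabilities "basic_execution"
  let capabilities :=
    if shell_type == "nu" then
      let capabilities :=
        if ["save", "append", "open"].any (fun p => PySem.Str.isIn p command) then
          PySem.Set.add capabilities "file_operations" else capabilities
      if PySem.Str.isIn "http" command || PySem.Str.isIn "fetch" command then
        PySem.Set.add capabilities "network_operations" else capabilities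
    else
      let capabilities :=
        if [">", ">>", "cat", "cp", "mv"].any (fun p => PySem.Str.isIn p command) then
          PySem.Set.add capabilities "file_operations" else capabilities
      if ["curl", "wget", "nc"].any (fun p => PySem.Str.isIn p command) then
        PySem.Set.add capabilities "network_operations" else capabilities
  let capabilities :=
    if PySem.Str.isIn "sudo" command || PySem.Str.isIn "doas" command then
      PySem.Set.add capabilities "privileged_execution" else capabilities
  let capabilities :=
    if ["systemctl", "service"].any (fun p => PySem.Str.isIn p command) then
      PySem.Set.add capabilities "service_management" else capabilities
  capabilities

-- ===== PORT B =====
-- the rules table: (shell_key, patterns, capability); none = common rule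
def pvRules : List (Option String × List String × String) :=
  [ (some "nu",   (["save", "append", "open"],      "file_operations")),
    (some "nu",   (["http", "fetch"],               "network_operations")),
    (some "bash", ([">", ">>", "cat", "cp", "mv"],  "file_operations")),
    (some "bash", (["curl", "wget", "nc"],          "network_operations")),
    (none,        (["sudo", "doas"],                "privileged_execution")),
    (none,        (["systemctl", "service"],        "service_management")) ]

def determine_capabilities_py_alt (command : String) (shell_type : String) : List String :=
  pvRules.foldl
    (fun caps rule =>
      let applies :=
        match rule.1 with
        | none => true
        | some k => (k == "nu") == (shell_type == "nu")
      if applies && rule.2.1.any (fun p => PySem.Str.isIn p command) then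
        PySem.Set.add caps rule.2.2
      else caps)
    (PySem.Set.ofList ["basic_execution"])

-- ===== PRECONDITION & SPEC =====
def Spec_determine_capabilities_py (command : String) (shell_type : String) (out : List String) : Prop := out = determine_capabilities_py_alt command shell_type
instance (command : String) (shell_type : String) (out : List String) : Decidable (Spec_determine_capabilities_py command shell_type out) := by unfold Spec_determine_capabilities_py; infer_instance

-- ===== CLAIM (what is proved, stated in full; the proofs are below) =====
def Claim_equal_determine_capabilities_py : Prop := ∀ (command : String) (shell_type : String), Dom_determine_capabilities_py command shell_type → Spec_determine_capabilities_py command shell_type (determine_capabilities_py command shell_type)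

-- ===== LEMMAS AND PROOFS =====

-- ===== VERDICT (by name: the statement is the Claim_ definition above) =====
theorem determine_capabilities_py_spec : Claim_equal_determine_capabilities_py := by
  intro command shell_type _
  unfold Spec_determine_capabilities_py determine_capabilities_py determine_capabilities_py_alt pvRules
  by_cases h : shell_type == "nu" <;>
    simp only [h, List.foldl, List.any, beq_self_eq_true, Bool.true_and,
      if_true, if_false, Bool.or_false, reduceCtorEq] <;>
    rfl
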